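-- pv_equiv track=rewrite | github.com/faulknerpearce/advent_of_code | 2024/day_7/part_1.py | check_possible_equations
-- ===== SOURCE A (Python) =====
-- from itertools import product
--
-- def evaluate_left_to_right(expression):
--     '''Evaluates an arithmetic expression from left to right, respecting operation order.'''
--     tokens = expression.split()
--     result = int(tokens[0])
--
--     for i in range(1, len(tokens), 2):
--         operator = tokens[i]
--         operand = int(tokens[i + 1])
--
--         if operator == '+':
--             result += operand
--         elif operator == '*':
--             result *= operand
--
--     return result
--
-- def insert_operators(array, op):
--     '''Inserts operators into an array to create an arithmetic expression as a string.'''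
--     result = str(array[0])
--
--     for i in range(len(op)):
--         result += f' {op[i]} {str(array[i+1])}'
--
--     return result
--
-- def check_possible_equations(target, array):
--     '''Checks if any combination of addition, multiplication results in the target value for the array.'''
--     operators = ['+', '*']
--
--     if len(array) == 2:
--         return check_equation(target, array)
--
--     else:
--         for combination in product(operators, repeat=len(array) - 1):
--             equation = insert_operators(array, list(combination))
--             result = evaluate_left_to_right(equation)
--
--             if result == target:
--                 return True
--
--         return False
--
-- def check_equation(target, numbers):
--     '''Checks if either addition or multiplication of two numbers equals the target.'''
--     return (numbers[0] + numbers[1]) == target or (numbers[0] * numbers[1]) == target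
-- ===== SOURCE B (Python) =====
-- def check_possible_equations(target, array):
--     vals = {array[0]}
--     for x in array[1:]:
--         vals = {v + x for v in vals} | {v * x for v in vals}
--     return target in vals
-- ===== Notes on version B (the rewrite author's own statement) =====
-- stated objective: alternative
-- what changed: Replaces the exhaustive enumeration of all 2^(n-1) operator strings (each built as a text expression and re-parsed token by token) with a single left-to-right pass maintaining the deduplicated set of reachable partial values.
import Mathlib
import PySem

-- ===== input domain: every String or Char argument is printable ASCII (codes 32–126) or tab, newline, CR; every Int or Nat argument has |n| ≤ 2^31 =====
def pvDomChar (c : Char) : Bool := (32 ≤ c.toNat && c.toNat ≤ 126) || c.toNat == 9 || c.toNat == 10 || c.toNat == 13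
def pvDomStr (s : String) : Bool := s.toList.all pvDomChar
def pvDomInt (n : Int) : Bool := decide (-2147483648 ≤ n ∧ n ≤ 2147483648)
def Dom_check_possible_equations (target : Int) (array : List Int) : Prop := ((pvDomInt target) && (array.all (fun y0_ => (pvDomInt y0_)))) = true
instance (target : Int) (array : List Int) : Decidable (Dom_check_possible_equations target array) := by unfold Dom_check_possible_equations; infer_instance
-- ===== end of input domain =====

-- B replaces A's enumeration of all operator strings (each built as text and re-parsed) by one
-- pass maintaining the deduplicated set of reachable partial values (a different algorithm).


-- ===== PORT A =====
-- Python strings are ported as List Char (PySem.Chars level).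
-- int(tok): hand port of Python's int() on a whitespace-free decimal token with an optional sign
-- (exact there; the only strings this program ever parses are '-?digits' tokens produced by
-- str(int) and split()).  PySem.Int.ofChars? is the exact general primitive, but its digit-loop
-- internals are private to PySem, so the str/int round-trip lemma this proof needs cannot be
-- stated against it; this hand port is exact on those tokens and is what the proof reasons about.
def parseDigits : List Char → Int → Option Int
  | [], acc => some acc
  | c :: t, acc => if c.isDigit then parseDigits t (acc * 10 + ((c.toNat : Int) - 48)) else none

def parseIntTok (cs : List Char) : Option Int :=
  match cs with
  | [] => none                                   -- int('') : ValueError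
  | '-' :: ds => if ds = [] then none else (parseDigits ds 0).map (fun v => -v)
  | ds => parseDigits ds 0

-- evaluate_left_to_right: tokens = expression.split(); result = int(tokens[0]); loop over
-- range(1, len(tokens), 2).  none = a raise (IndexError/ValueError), exactly where Python raises.
def evaluate_left_to_right (expression : List Char) : Option Int :=
  let tokens := PySem.Chars.split₀ expression
  match PySem.List.pyGet? tokens 0 with
  | none => none
  | some t0 =>
    match parseIntTok t0 with
    | none => none
    | some r0 =>
      (PySem.List.pyRange 1 (tokens.length : Int) 2).foldl (fun st i =>
        match st, PySem.List.pyGet? tokens i, (PySem.List.pyGet? tokens (i + 1)).bind parseIntTok with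
        | some r, some op, some x =>
          if op = ['+'] then some (r + x) else if op = ['*'] then some (r * x) else some r
        | _, _, _ => none) (some r0)

-- insert_operators: result = str(array[0]); for i in range(len(op)): result += f' {op[i]} {str(array[i+1])}'
def insert_operators (array : List Int) (op : List (List Char)) : Option (List Char) :=
  match PySem.List.pyGet? array 0 with
  | none => none                                 -- array[0] : IndexError on []
  | some a0 =>
    (PySem.List.pyRange 0 (op.length : Int) 1).foldl (fun st i =>
      match st, PySem.List.pyGet? op i, PySem.List.pyGet? array (i + 1) with
      | some s, some o, some x => some (s ++ ' ' :: (o ++ ' ' :: PySem.Int.toChars x))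
      | _, _, _ => none) (some (PySem.Int.toChars a0))

-- check_equation: only ever called with len(numbers) == 2; on shorter lists Python raises
-- (IndexError), ported as false (unreachable from check_possible_equations).
def check_equation (target : Int) (numbers : List Int) : Bool :=
  match numbers with
  | n0 :: n1 :: _ => ((n0 + n1) == target) || ((n0 * n1) == target)
  | _ => false

-- itertools.product(l, repeat=n), hand port (not in PySem); CPython's order (first factor outermost).
def pyProduct (l : List (List Char)) : Nat → List (List (List Char))
  | 0 => [[]]
  | n + 1 => l.flatMap (fun x => (pyProduct l n).map (x :: ·))

def check_possible_equations (target : Int) (array : List Int) : Bool :=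
  if array.length == 2 then check_equation target array
  else
    (pyProduct [['+'], ['*']] (array.length - 1)).any (fun combination =>
      ((insert_operators array combination).bind evaluate_left_to_right) == some target)

-- ===== PORT B =====
def check_possible_equations_alt (target : Int) (array : List Int) : Bool :=
  match PySem.List.pyGet? array 0 with
  | none => false                                -- array[0] : IndexError on []; outside Pre_
  | some a0 =>
    let vals := (PySem.List.slice array (some 1) none).foldl
      (fun (vals : PySem.Set Int) x =>
        PySem.Set.union (PySem.Set.ofList (vals.map (· + x))) (PySem.Set.ofList (vals.map (· * x))))
      (PySem.Set.ofList [a0])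
    vals.contains target

-- ===== PRECONDITION & SPEC =====
-- A raises on the empty list (ValueError from product(repeat=-1)); everywhere else it returns.
def Pre_check_possible_equations (target : Int) (array : List Int) : Prop := array ≠ []
instance (target : Int) (array : List Int) : Decidable (Pre_check_possible_equations target array) := by unfold Pre_check_possible_equations; infer_instance
def pvWitness_check_possible_equations : Int × List Int := (5, [2, 3])

def Spec_check_possible_equations (target : Int) (array : List Int) (out : Bool) : Prop := out = check_possible_equations_alt target array
instance (target : Int) (array : List Int) (out : Bool) : Decidable (Spec_check_possible_equations target array out) := by unfold Spec_check_possible_equations; infer_instance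

-- ===== CLAIM (what is proved, stated in full; the proofs are below) =====
def Claim_equal_check_possible_equations : Prop := ∀ (target : Int) (array : List Int), Dom_check_possible_equations target array → Pre_check_possible_equations target array → Spec_check_possible_equations target array (check_possible_equations target array)

-- ===== LEMMAS AND PROOFS =====

-- Left-to-right evaluation of the chain a0 op1 x1 op2 x2 …, as a fold over (operator, operand) pairs.
def evalPairs (a : Int) (ps : List (List Char × Int)) : Int :=
  ps.foldl (fun r p => if p.1 = ['+'] then r + p.2 else r * p.2) a

-- "v is reachable from a0 over rest by some +/* chain" — the common characterisation of A and B.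
def Reach (a0 : Int) (rest : List Int) (v : Int) : Prop :=
  ∃ ops : List (List Char), ops.length = rest.length ∧
    (∀ o ∈ ops, o = ['+'] ∨ o = ['*']) ∧ evalPairs a0 (ops.zip rest) = v

-- ---- str/int round trip ----

theorem digitChar_facts (d : Nat) (h : d < 10) :
    (Nat.digitChar d).isDigit = true ∧ ((Nat.digitChar d).toNat : Int) = 48 + d ∧
    PySem.Chars.isspace (Nat.digitChar d) = false ∧ Nat.digitChar d ≠ '-' := by
  interval_cases d <;> exact ⟨rfl, rfl, rfl, by decide⟩

theorem parseDigits_append (l1 l2 : List Char) (acc : Int) :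
    parseDigits (l1 ++ l2) acc = (parseDigits l1 acc).bind (fun v => parseDigits l2 v) := by
  induction l1 generalizing acc with
  | nil => simp [parseDigits]
  | cons c t ih =>
    simp only [List.cons_append, parseDigits]
    by_cases hc : c.isDigit <;> simp [hc, ih]

theorem toDigits_ne_nil (m : Nat) : Nat.toDigits 10 m ≠ [] := by
  rw [Nat.toDigits_eq_if (by norm_num)]
  split <;> simp

theorem mem_toDigits (m : Nat) : ∀ c ∈ Nat.toDigits 10 m, ∃ d, d < 10 ∧ c = Nat.digitChar d := by
  induction m using Nat.strong_induction_on with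
  | _ m ih =>
    rw [Nat.toDigits_eq_if (by norm_num)]
    split
    · rename_i hm
      intro c hc; simp at hc; exact ⟨m, hm, hc⟩
    · rename_i hm
      intro c hc
      rcases List.mem_append.mp hc with h | h
      · exact ih (m / 10) (Nat.div_lt_self (by omega) (by norm_num)) c h
      · simp at h; exact ⟨m % 10, Nat.mod_lt _ (by norm_num), h⟩

theorem parseDigits_toDigits (m : Nat) : ∀ acc : Int,
    parseDigits (Nat.toDigits 10 m) acc = some (acc * 10 ^ (Nat.toDigits 10 m).length + m) := by
  induction m using Nat.strong_induction_on with
  | _ m ih =>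
    intro acc
    rw [Nat.toDigits_eq_if (by norm_num)]
    split
    · rename_i hm
      obtain ⟨hd, ht, -, -⟩ := digitChar_facts m hm
      simp [parseDigits, hd, ht]
    · rename_i hm
      rw [parseDigits_append, ih (m / 10) (Nat.div_lt_self (by omega) (by norm_num)) acc]
      obtain ⟨hd, ht, -, -⟩ := digitChar_facts (m % 10) (Nat.mod_lt _ (by norm_num))
      simp [parseDigits, hd, ht, List.length_append]
      have h := Int.mul_ediv_add_emod (m : Int) 10
      rw [pow_succ]
      linear_combination h

theorem parseDigits_toDigits_zero (m : Nat) :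
    parseDigits (Nat.toDigits 10 m) 0 = some m := by
  rw [parseDigits_toDigits]; simp

theorem parseIntTok_toChars (n : Int) : parseIntTok (PySem.Int.toChars n) = some n := by
  unfold PySem.Int.toChars
  split
  · rename_i hn
    have hne := toDigits_ne_nil n.natAbs
    rw [show parseIntTok ('-' :: Nat.toDigits 10 n.natAbs)
          = (parseDigits (Nat.toDigits 10 n.natAbs) 0).map (fun v => -v) from by
        simp [parseIntTok, hne], parseDigits_toDigits_zero]
    show some (-(n.natAbs : Int)) = some n
    congr 1; omega
  · rename_i hn
    obtain ⟨c, t, hct⟩ := List.exists_cons_of_ne_nil (toDigits_ne_nil n.toNat)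
    obtain ⟨d, hd, hcd⟩ := mem_toDigits n.toNat c (hct ▸ List.mem_cons_self ..)
    have hcne : c ≠ '-' := hcd ▸ (digitChar_facts d hd).2.2.2
    have : parseIntTok (Nat.toDigits 10 n.toNat) = parseDigits (Nat.toDigits 10 n.toNat) 0 := by
      rw [hct]
      unfold parseIntTok
      split
      · rename_i h; exact absurd h (by simp)
      · rename_i ds h
        exact absurd (List.head_eq_of_cons_eq h.symm).symm hcne
      · rfl
    rw [this, parseDigits_toDigits_zero]
    exact congrArg some (by omega)

-- ---- splitting the built expression back into its tokens ----

theorem go_nil (cur acc) : PySem.Chars.split₀.go [] cur acc =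
    (if cur.isEmpty then acc.reverse else (cur.reverse :: acc).reverse) := by
  simp [PySem.Chars.split₀.go]

theorem go_word (w : List Char) (hw : ∀ c ∈ w, PySem.Chars.isspace c = false) :
    ∀ (s : List Char) (cur acc), PySem.Chars.split₀.go (w ++ s) cur acc
      = PySem.Chars.split₀.go s (w.reverse ++ cur) acc := by
  induction w with
  | nil => simp
  | cons c t ih =>
    intro s cur acc
    have hc : PySem.Chars.isspace c = false := hw c (by simp)
    rw [List.cons_append, PySem.Chars.split₀.go]
    simp only [hc]
    rw [ih (fun x hx => hw x (by simp [hx])) s (c :: cur) acc]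
    simp

-- a word the splitter keeps whole: nonempty, no whitespace
def NiceTok (t : List Char) : Prop := t ≠ [] ∧ ∀ c ∈ t, PySem.Chars.isspace c = false

theorem go_toks (ts : List (List Char)) (hts : ∀ t ∈ ts, NiceTok t) :
    ∀ (cur : List Char) (acc : List (List Char)), cur ≠ [] →
    PySem.Chars.split₀.go ((ts.map (' ' :: ·)).flatten) cur acc
      = acc.reverse ++ cur.reverse :: ts := by
  induction ts with
  | nil =>
    intro cur acc hcur
    rw [List.map_nil, List.flatten_nil, go_nil]
    simp [List.isEmpty_iff, hcur]
  | cons t ts ih =>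
    intro cur acc hcur
    obtain ⟨htne, htns⟩ := hts t (by simp)
    simp only [List.map_cons, List.flatten_cons, List.cons_append]
    rw [PySem.Chars.split₀.go]
    have hsp : PySem.Chars.isspace ' ' = true := by decide
    simp only [hsp, List.isEmpty_iff, if_neg hcur, if_true]
    rw [go_word t htns, List.append_nil,
      ih (fun x hx => hts x (by simp [hx])) t.reverse (cur.reverse :: acc) (by simp [htne])]
    simp

theorem split₀_toks (t0 : List Char) (ts : List (List Char))
    (h0 : NiceTok t0) (hts : ∀ t ∈ ts, NiceTok t) :
    PySem.Chars.split₀ (t0 ++ (ts.map (' ' :: ·)).flatten) = t0 :: ts := by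
  unfold PySem.Chars.split₀
  rw [go_word t0 h0.2, List.append_nil, go_toks ts hts t0.reverse [] (by simp [h0.1])]
  simp

theorem flat_shape (ps : List (List Char × Int)) :
    ps.flatMap (fun p => ' ' :: (p.1 ++ ' ' :: PySem.Int.toChars p.2))
      = ((ps.flatMap (fun p => [p.1, PySem.Int.toChars p.2])).map (' ' :: ·)).flatten := by
  induction ps with
  | nil => simp
  | cons p ps ih => simp [ih]

theorem niceTok_toChars (n : Int) : NiceTok (PySem.Int.toChars n) := by
  unfold PySem.Int.toChars
  have hdig : ∀ m : Nat, ∀ c ∈ Nat.toDigits 10 m, PySem.Chars.isspace c = false := by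
    intro m c hc
    obtain ⟨d, hd, rfl⟩ := mem_toDigits m c hc
    exact (digitChar_facts d hd).2.2.1
  split
  · exact ⟨by simp, by
      intro c hc
      rcases List.mem_cons.mp hc with rfl | hc
      · decide
      · exact hdig _ c hc⟩
  · exact ⟨toDigits_ne_nil _, hdig _⟩

theorem split₀_built (a0 : Int) (ps : List (List Char × Int))
    (hops : ∀ p ∈ ps, p.1 = ['+'] ∨ p.1 = ['*']) :
    PySem.Chars.split₀ (PySem.Int.toChars a0 ++
        ps.flatMap (fun p => ' ' :: (p.1 ++ ' ' :: PySem.Int.toChars p.2))) =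
      PySem.Int.toChars a0 :: ps.flatMap (fun p => [p.1, PySem.Int.toChars p.2]) := by
  rw [flat_shape]
  refine split₀_toks _ _ (niceTok_toChars a0) ?_
  intro t ht
  rcases List.mem_flatMap.mp ht with ⟨p, hp, htp⟩
  simp only [List.mem_cons, List.not_mem_nil, or_false] at htp
  rcases htp with rfl | rfl
  · rcases hops p hp with h | h <;> rw [h] <;>
      exact ⟨by simp, by intro c hc; simp at hc; subst hc; rfl⟩
  · exact niceTok_toChars _

-- ---- the insert_operators loop ----

def insStep (array : List Int) (op : List (List Char)) (st : Option (List Char)) (i : Int) :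
    Option (List Char) :=
  match st, PySem.List.pyGet? op i, PySem.List.pyGet? array (i + 1) with
  | some s, some o, some x => some (s ++ ' ' :: (o ++ ' ' :: PySem.Int.toChars x))
  | _, _, _ => none

theorem pyGet?_cons_zero {α : Type} (a : α) (l : List α) :
    PySem.List.pyGet? (a :: l) 0 = some a := by
  simp [PySem.List.pyGet?, PySem.List.pyIdx?]

theorem insert_loop (ops : List (List Char)) : ∀ (rest : List Int), ops.length = rest.length →
    ∀ (a0 : Int) (s : List Char),
    ((List.range ops.length).map (fun j : Nat => (j : Int))).foldl
        (insStep (a0 :: rest) ops) (some s)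
      = some (s ++ (ops.zip rest).flatMap (fun p => ' ' :: (p.1 ++ ' ' :: PySem.Int.toChars p.2))) := by
  induction ops using List.reverseRecOn with
  | nil => intro rest h a0 s; simp
  | append_singleton os o ih =>
    intro rest h a0 s
    rcases rest.eq_nil_or_concat with rfl | ⟨rs, x, rfl⟩
    · simp at h
    simp only [List.concat_eq_append] at h ⊢
    have hlen : os.length = rs.length := by simp at h; omega
    simp only [List.length_append, List.length_cons, List.length_nil, List.range_succ,
      List.map_append, List.map_cons, List.map_nil, List.foldl_append]
    have hpre : ∀ (acc : Option (List Char)), ∀ i ∈ (List.range os.length).map (fun j : Nat => (j : Int)),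
        insStep (a0 :: (rs ++ [x])) (os ++ [o]) acc i = insStep (a0 :: rs) os acc i := by
      intro acc i hi
      obtain ⟨j, hj, rfl⟩ := List.mem_map.mp hi
      have hj' := List.mem_range.mp hj
      unfold insStep
      have h1 : (j : Int) + 1 = ((j + 1 : Nat) : Int) := by push_cast; ring
      rw [h1]
      simp only [PySem.List.pyGet?_natCast]
      rw [List.getElem?_append_left (by omega),
        show (a0 :: (rs ++ [x])) = (a0 :: rs) ++ [x] from rfl,
        List.getElem?_append_left (by simp; omega)]
    rw [PySem.List.foldl_congr_mem _ _ _ _ hpre, ih rs hlen a0 s]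
    simp only [List.foldl_cons, List.foldl_nil]
    unfold insStep
    have h1 : (os.length : Int) + 1 = ((os.length + 1 : Nat) : Int) := by push_cast; ring
    rw [PySem.List.pyGet?_natCast, List.getElem?_append_right (by omega), Nat.sub_self, h1,
      PySem.List.pyGet?_natCast, show (a0 :: (rs ++ [x])) = (a0 :: rs) ++ [x] from rfl,
      List.getElem?_append_right (by simp [hlen]),
      show os.length + 1 - (a0 :: rs).length = 0 from by simp [hlen]]
    rw [List.zip_append hlen]
    simp

theorem insert_operators_eq (a0 : Int) (rest : List Int) (ops : List (List Char))
    (h : ops.length = rest.length) :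
    insert_operators (a0 :: rest) ops =
      some (PySem.Int.toChars a0 ++
        (ops.zip rest).flatMap (fun p => ' ' :: (p.1 ++ ' ' :: PySem.Int.toChars p.2))) := by
  unfold insert_operators
  rw [pyGet?_cons_zero]
  rw [show PySem.List.pyRange 0 (ops.length : Int) 1
        = (List.range ops.length).map (fun j : Nat => (j : Int)) from
      PySem.List.pyRange_zero_natCast ops.length]
  exact insert_loop ops rest h a0 _

-- ---- the evaluate_left_to_right loop ----

def toksOf (a0 : Int) (ps : List (List Char × Int)) : List (List Char) :=
  PySem.Int.toChars a0 :: ps.flatMap (fun p => [p.1, PySem.Int.toChars p.2])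

theorem toksOf_length (a0 : Int) (ps : List (List Char × Int)) :
    (toksOf a0 ps).length = 1 + 2 * ps.length := by
  induction ps with
  | nil => rfl
  | cons p ps ih => simp [toksOf] at *; omega

theorem toksOf_append (a0 : Int) (qs : List (List Char × Int)) (p : List Char × Int) :
    toksOf a0 (qs ++ [p]) = toksOf a0 qs ++ [p.1, PySem.Int.toChars p.2] := by
  simp [toksOf]

theorem pyRange_odd (m : Nat) :
    PySem.List.pyRange 1 (1 + 2 * (m : Int)) 2
      = (List.range m).map (fun j : Nat => (1 : Int) + 2 * (j : Int)) := by
  rw [PySem.List.pyRange_of_pos _ _ (by norm_num)]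
  by_cases hm : m = 0
  · subst hm; simp
  · rw [if_pos (by omega)]
    have h : ((1 + 2 * (m : Int) - 1 + 2 - 1) / 2).toNat = m := by omega
    rw [h]

def evalStep (tokens : List (List Char)) (st : Option Int) (i : Int) : Option Int :=
  match st, PySem.List.pyGet? tokens i, (PySem.List.pyGet? tokens (i + 1)).bind parseIntTok with
  | some r, some op, some x =>
    if op = ['+'] then some (r + x) else if op = ['*'] then some (r * x) else some r
  | _, _, _ => none

theorem eval_loop (a0 : Int) (ps : List (List Char × Int))
    (hops : ∀ p ∈ ps, p.1 = ['+'] ∨ p.1 = ['*']) (r0 : Int) :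
    ((List.range ps.length).map (fun j : Nat => (1 : Int) + 2 * (j : Int))).foldl
      (evalStep (toksOf a0 ps)) (some r0) = some (evalPairs r0 ps) := by
  induction ps using List.reverseRecOn generalizing r0 with
  | nil => simp [evalPairs]
  | append_singleton qs p ih =>
    have hlen : (toksOf a0 qs).length = 1 + 2 * qs.length := toksOf_length a0 qs
    simp only [List.length_append, List.length_cons, List.length_nil, List.range_succ,
      List.map_append, List.map_cons, List.map_nil, List.foldl_append]
    have hpre : ∀ (acc : Option Int), ∀ x ∈ (List.range qs.length).map (fun j : Nat => (1 : Int) + 2 * (j : Int)),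
        evalStep (toksOf a0 (qs ++ [p])) acc x = evalStep (toksOf a0 qs) acc x := by
      intro acc x hx
      obtain ⟨j, hj, rfl⟩ := List.mem_map.mp hx
      have hj' := List.mem_range.mp hj
      rw [toksOf_append]
      unfold evalStep
      have h1 : (1 : Int) + 2 * (j : Int) = ((1 + 2 * j : Nat) : Int) := by push_cast; ring
      have h2 : (1 : Int) + 2 * (j : Int) + 1 = ((2 + 2 * j : Nat) : Int) := by push_cast; ring
      rw [h1, PySem.List.pyGet?_natCast, PySem.List.pyGet?_natCast,
        List.getElem?_append_left (by omega), ← PySem.List.pyGet?_natCast, ← h1]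
      rw [h2, PySem.List.pyGet?_natCast, PySem.List.pyGet?_natCast,
        List.getElem?_append_left (by omega), ← PySem.List.pyGet?_natCast]
    rw [PySem.List.foldl_congr_mem _ _ _ _ hpre,
      ih (fun q hq => hops q (by simp [hq])) r0]
    -- final step at index 1 + 2*qs.length
    have hi : (1 : Int) + 2 * (qs.length : Int) = ((1 + 2 * qs.length : Nat) : Int) := by push_cast; ring
    have h2' : ((1 + 2 * qs.length : Nat) : Int) + 1 = ((2 + 2 * qs.length : Nat) : Int) := by push_cast; ring
    rw [toksOf_append, hi]
    simp only [List.foldl_cons, List.foldl_nil]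
    unfold evalStep
    rw [PySem.List.pyGet?_natCast, h2', PySem.List.pyGet?_natCast,
      List.getElem?_append_right (by omega), List.getElem?_append_right (by omega)]
    have e1 : 1 + 2 * qs.length - (toksOf a0 qs).length = 0 := by omega
    have e2 : 2 + 2 * qs.length - (toksOf a0 qs).length = 1 := by omega
    rw [e1, e2]
    simp only [List.getElem?_cons_zero, List.getElem?_cons_succ]
    rcases hops p (by simp) with h | h <;>
      simp [h, evalPairs, List.foldl_append, parseIntTok_toChars]

theorem evaluate_built (a0 : Int) (ps : List (List Char × Int))
    (hops : ∀ p ∈ ps, p.1 = ['+'] ∨ p.1 = ['*']) :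
    evaluate_left_to_right (PySem.Int.toChars a0 ++
        ps.flatMap (fun p => ' ' :: (p.1 ++ ' ' :: PySem.Int.toChars p.2))) =
      some (evalPairs a0 ps) := by
  simp only [evaluate_left_to_right]
  rw [split₀_built a0 ps hops, pyGet?_cons_zero]
  dsimp only
  rw [parseIntTok_toChars]
  dsimp only
  rw [show (PySem.Int.toChars a0 :: ps.flatMap (fun p => [p.1, PySem.Int.toChars p.2]))
        = toksOf a0 ps from rfl]
  rw [show ((toksOf a0 ps).length : Int) = 1 + 2 * (ps.length : Int) from by
    rw [toksOf_length]; push_cast; ring]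
  rw [pyRange_odd]
  exact eval_loop a0 ps hops a0


-- ---- itertools.product characterisation ----

theorem mem_pyProduct (l : List (List Char)) (n : Nat) (c : List (List Char)) :
    c ∈ pyProduct l n ↔ c.length = n ∧ ∀ x ∈ c, x ∈ l := by
  induction n generalizing c with
  | zero =>
    simp only [pyProduct, List.mem_singleton]
    constructor
    · rintro rfl; simp
    · rintro ⟨h, -⟩; exact List.length_eq_zero_iff.mp h
  | succ n ih =>
    simp only [pyProduct, List.mem_flatMap, List.mem_map]
    constructor
    · rintro ⟨x, hx, c', hc', rfl⟩
      obtain ⟨hl, hall⟩ := ih c' |>.mp hc'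
      refine ⟨by simp [hl], ?_⟩
      intro y hy
      rcases List.mem_cons.mp hy with rfl | hy'
      · exact hx
      · exact hall y hy'
    · rintro ⟨hl, hall⟩
      rcases c with _ | ⟨x, c'⟩
      · simp at hl
      · exact ⟨x, hall x (by simp), c', (ih c').mpr ⟨by simpa using hl, fun y hy => hall y (by simp [hy])⟩, rfl⟩

-- ---- A's characterisation ----

theorem A_combo (target a0 : Int) (rest : List Int) (ops : List (List Char))
    (hlen : ops.length = rest.length) (hops : ∀ o ∈ ops, o = ['+'] ∨ o = ['*']) :
    (((insert_operators (a0 :: rest) ops).bind evaluate_left_to_right) == some target)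
      = (evalPairs a0 (ops.zip rest) == target) := by
  rw [insert_operators_eq a0 rest ops hlen]
  show ((evaluate_left_to_right _) == some target) = _
  rw [evaluate_built a0 (ops.zip rest) (fun p hp => hops p.1 (List.of_mem_zip hp).1)]
  simp

theorem A_char (target a0 : Int) (rest : List Int) :
    check_possible_equations target (a0 :: rest) = true ↔ Reach a0 rest target := by
  unfold check_possible_equations
  rcases eq_or_ne rest.length 1 with h1 | h1
  · obtain ⟨a1, rfl⟩ : ∃ a1, rest = [a1] := by
      rcases rest with _ | ⟨a1, t⟩
      · simp at h1
      · rcases t with _ | ⟨b, t⟩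
        · exact ⟨a1, rfl⟩
        · simp at h1
    rw [if_pos (by simp)]
    unfold check_equation
    simp only [Bool.or_eq_true, beq_iff_eq]
    constructor
    · rintro (h | h)
      · exact ⟨[['+']], rfl, by simp, by simp [evalPairs, h]⟩
      · exact ⟨[['*']], rfl, by simp, by simp [evalPairs]; simpa using h⟩
    · rintro ⟨ops, hlen, hops, heval⟩
      rcases ops with _ | ⟨o, _ | ⟨o2, t⟩⟩ <;> simp at hlen
      rcases hops o (by simp) with rfl | rfl
      · left; simpa [evalPairs] using heval
      · right; simpa [evalPairs] using heval
  · rw [if_neg (by simp [h1])]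
    rw [List.any_eq_true]
    constructor
    · rintro ⟨ops, hmem, hval⟩
      obtain ⟨hlen, hall⟩ := (mem_pyProduct _ _ _).mp hmem
      have hlen' : ops.length = rest.length := by simpa using hlen
      have hops : ∀ o ∈ ops, o = ['+'] ∨ o = ['*'] := by
        intro o ho; have := hall o ho; simpa using this
      rw [A_combo target a0 rest ops hlen' hops] at hval
      exact ⟨ops, hlen', hops, by simpa using hval⟩
    · rintro ⟨ops, hlen, hops, heval⟩
      refine ⟨ops, (mem_pyProduct _ _ _).mpr ⟨by simpa using hlen, fun o ho => by
        rcases hops o ho with rfl | rfl <;> simp⟩, ?_⟩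
      rw [A_combo target a0 rest ops hlen hops]
      simp [heval]

-- ---- B's characterisation ----

def dpStep (vals : PySem.Set Int) (x : Int) : PySem.Set Int :=
  PySem.Set.union (PySem.Set.ofList (vals.map (· + x))) (PySem.Set.ofList (vals.map (· * x)))

theorem mem_dpStep (S : PySem.Set Int) (x v : Int) :
    v ∈ dpStep S x ↔ ∃ u ∈ S, v = u + x ∨ v = u * x := by
  unfold dpStep
  rw [PySem.Set.mem_union]
  simp only [PySem.Set.mem_ofList, List.mem_map]
  constructor
  · rintro (⟨u, hu, rfl⟩ | ⟨u, hu, rfl⟩) <;> exact ⟨u, hu, by simp⟩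
  · rintro ⟨u, hu, rfl | rfl⟩
    · exact Or.inl ⟨u, hu, rfl⟩
    · exact Or.inr ⟨u, hu, rfl⟩

theorem reach_cons (u x v : Int) (rest : List Int) :
    Reach u (x :: rest) v ↔ Reach (u + x) rest v ∨ Reach (u * x) rest v := by
  constructor
  · rintro ⟨ops, hlen, hops, heval⟩
    rcases ops with _ | ⟨o, ops⟩
    · simp at hlen
    have hlen' : ops.length = rest.length := by simpa using hlen
    have hops' : ∀ o' ∈ ops, o' = ['+'] ∨ o' = ['*'] := fun o' ho' => hops o' (by simp [ho'])
    rcases hops o (by simp) with rfl | rfl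
    · left; exact ⟨ops, hlen', hops', by simpa [evalPairs] using heval⟩
    · right; exact ⟨ops, hlen', hops', by simpa [evalPairs] using heval⟩
  · rintro (⟨ops, hlen, hops, heval⟩ | ⟨ops, hlen, hops, heval⟩)
    · refine ⟨['+'] :: ops, by simp [hlen], ?_, by simpa [evalPairs] using heval⟩
      intro o ho
      rcases List.mem_cons.mp ho with rfl | ho'
      · exact Or.inl rfl
      · exact hops o ho'
    · refine ⟨['*'] :: ops, by simp [hlen], ?_, by simpa [evalPairs] using heval⟩
      intro o ho
      rcases List.mem_cons.mp ho with rfl | ho'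
      · exact Or.inr rfl
      · exact hops o ho'

theorem mem_dpFold (rest : List Int) : ∀ (S : PySem.Set Int) (v : Int),
    v ∈ rest.foldl dpStep S ↔ ∃ u ∈ S, Reach u rest v := by
  induction rest with
  | nil =>
    intro S v
    simp only [List.foldl_nil]
    constructor
    · intro hv; exact ⟨v, hv, [], rfl, by simp, rfl⟩
    · rintro ⟨u, hu, ops, hlen, hops, heval⟩
      rcases List.length_eq_zero_iff.mp hlen
      simpa [evalPairs] using heval ▸ hu
  | cons x rest ih =>
    intro S v
    rw [List.foldl_cons, ih]
    constructor
    · rintro ⟨u', hu', hr⟩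
      obtain ⟨u, hu, rfl | rfl⟩ := (mem_dpStep S x u').mp hu'
      · exact ⟨u, hu, (reach_cons u x v rest).mpr (Or.inl hr)⟩
      · exact ⟨u, hu, (reach_cons u x v rest).mpr (Or.inr hr)⟩
    · rintro ⟨u, hu, hr⟩
      rcases (reach_cons u x v rest).mp hr with hr' | hr'
      · exact ⟨u + x, (mem_dpStep S x _).mpr ⟨u, hu, Or.inl rfl⟩, hr'⟩
      · exact ⟨u * x, (mem_dpStep S x _).mpr ⟨u, hu, Or.inr rfl⟩, hr'⟩

theorem B_char (target a0 : Int) (rest : List Int) :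
    check_possible_equations_alt target (a0 :: rest) = true ↔ Reach a0 rest target := by
  unfold check_possible_equations_alt
  rw [pyGet?_cons_zero]
  dsimp only
  rw [show PySem.List.slice (a0 :: rest) (some 1) none = rest from by
    rw [PySem.List.slice_from _ (by norm_num)]; rfl]
  rw [show (fun (vals : PySem.Set Int) x =>
      PySem.Set.union (PySem.Set.ofList (vals.map (· + x))) (PySem.Set.ofList (vals.map (· * x))))
      = dpStep from rfl]
  rw [PySem.Set.contains_iff, mem_dpFold]
  constructor
  · rintro ⟨u, hu, hr⟩
    have : u = a0 := by simpa [PySem.Set.ofList] using hu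
    exact this ▸ hr
  · intro hr
    exact ⟨a0, by simp [PySem.Set.ofList], hr⟩

-- ===== VERDICT (by name: the statement is the Claim_ definition above) =====
theorem check_possible_equations_spec : Claim_equal_check_possible_equations := by
  intro target array _hd hpre
  unfold Spec_check_possible_equations
  match array with
  | [] => exact absurd rfl hpre
  | a0 :: rest =>
    exact Bool.eq_iff_iff.mpr ((A_char target a0 rest).trans (B_char target a0 rest).symm)
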